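-- pv_equiv track=rewrite | github.com/scasella/society-of-thought-bench | society_of_thought_bench/families.py | _has_near_miss
-- ===== SOURCE A (Python) =====
-- def _has_near_miss(numbers: list[int], target: int) -> bool:
--     for i, first in enumerate(numbers):
--         for j, second in enumerate(numbers):
--             if i == j:
--                 continue
--             for candidate in (
--                 first + second,
--                 abs(first - second),
--                 first * second,
--             ):
--                 if candidate != target and abs(candidate - target) <= 3:
--                     return True
--     return False
-- ===== SOURCE B (Python) =====
-- def _has_near_miss(numbers: list[int], target: int) -> bool:
--     counts = {}
--     for v in numbers:
--         counts[v] = counts.get(v, 0) + 1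
--
--     def has_partner(v, s):
--         if s == v:
--             return counts[v] >= 2
--         return s in counts
--
--     for v in counts:
--         for d in (-3, -2, -1, 1, 2, 3):
--             c = target + d
--             if has_partner(v, c - v):
--                 return True
--             if c >= 0 and (has_partner(v, v - c) or has_partner(v, v + c)):
--                 return True
--             if v == 0:
--                 if c == 0 and len(numbers) >= 2:
--                     return True
--             elif c % v == 0 and has_partner(v, c // v):
--                 return True
--     return False
-- ===== Notes on version B (the rewrite author's own statement) =====
-- stated objective: faster
-- what changed: Replaces A's O(n^2) scan over all ordered index pairs by a single value-frequency dictionary pass that, for each distinct value, probes the seven-wide target window for sum, difference and product complements.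
import Mathlib
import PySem

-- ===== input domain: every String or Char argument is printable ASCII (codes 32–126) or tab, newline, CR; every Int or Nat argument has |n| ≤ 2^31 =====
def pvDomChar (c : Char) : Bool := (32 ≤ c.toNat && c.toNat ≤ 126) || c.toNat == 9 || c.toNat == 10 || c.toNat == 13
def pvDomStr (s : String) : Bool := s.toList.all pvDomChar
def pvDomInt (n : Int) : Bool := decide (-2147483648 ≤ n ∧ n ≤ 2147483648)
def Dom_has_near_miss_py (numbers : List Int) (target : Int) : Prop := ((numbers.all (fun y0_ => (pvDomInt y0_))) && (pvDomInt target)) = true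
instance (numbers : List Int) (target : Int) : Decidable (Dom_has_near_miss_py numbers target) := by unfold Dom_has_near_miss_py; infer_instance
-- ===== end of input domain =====

-- B replaces A's O(n^2) all-pairs scan by a value-frequency dictionary probed with the 7-wide
-- target window's sum/diff/product complements (objective: faster, asymptotic).

-- ===== PORT A =====
-- the 'if candidate != target and abs(candidate - target) <= 3' test
def pvInWin (target c : Int) : Bool := c != target && decide ((c - target).natAbs ≤ 3)

-- the inner 'for candidate in (first+second, abs(first-second), first*second)' loop
def pvNear (target first second : Int) : Bool :=
  [first + second, |first - second|, first * second].any (fun c => pvInWin target c)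

def has_near_miss_py (numbers : List Int) (target : Int) : Bool :=
  (PySem.List.enumerate numbers 0).any (fun p =>
    (PySem.List.enumerate numbers 0).any (fun q =>
      if p.1 == q.1 then false else pvNear target p.2 q.2))

-- ===== PORT B =====
-- Source B's has_partner(v, s)
def pvHasPartner (counts : PySem.Dict Int Int) (v s : Int) : Bool :=
  if s == v then decide (2 ≤ counts.getD v 0) else counts.contains s

def has_near_miss_py_alt (numbers : List Int) (target : Int) : Bool :=
  let counts := numbers.foldl (fun d x => d.insert x (d.getD x 0 + 1)) PySem.Dict.empty
  counts.keys.any (fun v =>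
    ([-3, -2, -1, 1, 2, 3] : List Int).any (fun d =>
      let c := target + d
      pvHasPartner counts v (c - v) ||
      (decide (0 ≤ c) && (pvHasPartner counts v (v - c) || pvHasPartner counts v (v + c))) ||
      (if v == 0 then decide (c = 0 ∧ 2 ≤ numbers.length)
       else decide (PySem.Int.mod c v = 0) && pvHasPartner counts v (PySem.Int.floordiv c v))))

-- ===== PRECONDITION & SPEC =====
def Spec_has_near_miss_py (numbers : List Int) (target : Int) (out : Bool) : Prop := out = has_near_miss_py_alt numbers target
instance (numbers : List Int) (target : Int) (out : Bool) : Decidable (Spec_has_near_miss_py numbers target out) := by unfold Spec_has_near_miss_py; infer_instance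

-- ===== CLAIM (what is proved, stated in full; the proofs are below) =====
def Claim_equal_has_near_miss_py : Prop := ∀ (numbers : List Int) (target : Int), Dom_has_near_miss_py numbers target → Spec_has_near_miss_py numbers target (has_near_miss_py numbers target)

-- ===== LEMMAS AND PROOFS =====

-- the common characterisation: a pair of DISTINCT positions whose values near-miss the target
def PairSpec (l : List Int) (t : Int) : Prop :=
  ∃ (i j : Nat) (hi : i < l.length) (hj : j < l.length), i ≠ j ∧ pvNear t l[i] l[j] = true

-- two distinct positions carrying values a and b
def PartnerIdx (l : List Int) (a b : Int) : Prop :=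
  ∃ (i j : Nat) (hi : i < l.length) (hj : j < l.length), i ≠ j ∧ l[i] = a ∧ l[j] = b

lemma count_two_of_partner {l : List Int} {a : Int} (h : PartnerIdx l a a) : 2 ≤ l.count a := by
  obtain ⟨i, j, hi, hj, hij, ha, hb⟩ := h
  rcases Nat.lt_or_ge i j with hlt | hge
  · have hsplit : l = l.take (i+1) ++ l.drop (i+1) := (List.take_append_drop _ _).symm
    have h1 : a ∈ l.take (i+1) := by
      have : (l.take (i+1))[i]'(by simp; omega) = l[i] := List.getElem_take
      exact (this.trans ha) ▸ List.getElem_mem _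
    have h2 : a ∈ l.drop (i+1) := by
      have hk : i + 1 + (j - (i+1)) < l.length := by omega
      have : (l.drop (i+1))[j - (i+1)]'(by simp; omega) = l[i + 1 + (j - (i+1))] := List.getElem_drop ..
      have he : l[i + 1 + (j - (i+1))] = a := by
        have : i + 1 + (j - (i+1)) = j := by omega
        simp [this, hb]
      exact (this.trans he) ▸ List.getElem_mem _
    calc 2 ≤ (l.take (i+1)).count a + (l.drop (i+1)).count a := by
            have := List.count_pos_iff.mpr h1
            have := List.count_pos_iff.mpr h2
            omega
      _ = l.count a := by rw [← List.count_append, ← hsplit]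
  · have hlt : j < i := by omega
    have hsplit : l = l.take (j+1) ++ l.drop (j+1) := (List.take_append_drop _ _).symm
    have h1 : a ∈ l.take (j+1) := by
      have : (l.take (j+1))[j]'(by simp; omega) = l[j] := List.getElem_take
      exact (this.trans hb) ▸ List.getElem_mem _
    have h2 : a ∈ l.drop (j+1) := by
      have : (l.drop (j+1))[i - (j+1)]'(by simp; omega) = l[j + 1 + (i - (j+1))] := List.getElem_drop ..
      have he : l[j + 1 + (i - (j+1))] = a := by
        have : j + 1 + (i - (j+1)) = i := by omega
        simp [this, ha]
      exact (this.trans he) ▸ List.getElem_mem _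
    calc 2 ≤ (l.take (j+1)).count a + (l.drop (j+1)).count a := by
            have := List.count_pos_iff.mpr h1
            have := List.count_pos_iff.mpr h2
            omega
      _ = l.count a := by rw [← List.count_append, ← hsplit]

lemma partner_of_count_two : ∀ (l : List Int) (a : Int), 2 ≤ l.count a → PartnerIdx l a a := by
  intro l
  induction l with
  | nil => intro a h; simp at h
  | cons x xs ih =>
    intro a h
    by_cases hx : x = a
    · have hmem : a ∈ xs := by
        rw [List.count_cons] at h
        simp [hx] at h
        exact h
      obtain ⟨k, hk, hka⟩ := List.mem_iff_getElem.mp hmem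
      refine ⟨0, k+1, by simp, by simp only [List.length_cons]; omega, ?_, by simpa using hx, by simpa using hka⟩
      omega
    · have h2 : 2 ≤ xs.count a := by
        rw [List.count_cons] at h
        simp [hx] at h
        omega
      obtain ⟨i, j, hi, hj, hij, ha, hb⟩ := ih a h2
      exact ⟨i+1, j+1, by simp only [List.length_cons]; omega, by simp only [List.length_cons]; omega, by omega, by simpa using ha, by simpa using hb⟩

lemma partner_iff (l : List Int) (a b : Int) :
    PartnerIdx l a b ↔ ((a = b ∧ 2 ≤ l.count a) ∨ (a ≠ b ∧ a ∈ l ∧ b ∈ l)) := by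
  constructor
  · rintro ⟨i, j, hi, hj, hij, ha, hb⟩
    by_cases hab : a = b
    · exact Or.inl ⟨hab, count_two_of_partner ⟨i, j, hi, hj, hij, ha, hab ▸ hb⟩⟩
    · exact Or.inr ⟨hab, ha ▸ List.getElem_mem _, hb ▸ List.getElem_mem _⟩
  · rintro (⟨rfl, h⟩ | ⟨hab, ha, hb⟩)
    · exact partner_of_count_two l a h
    · obtain ⟨i, hi, hia⟩ := List.mem_iff_getElem.mp ha
      obtain ⟨j, hj, hjb⟩ := List.mem_iff_getElem.mp hb
      exact ⟨i, j, hi, hj, fun hij => hab (by subst hij; rw [← hia, ← hjb]), hia, hjb⟩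

lemma hasPartner_iff (l : List Int) (v s : Int) :
    pvHasPartner (PySem.Dict.counter l) v s = true ↔
      ((s = v ∧ 2 ≤ l.count v) ∨ (s ≠ v ∧ s ∈ l)) := by
  unfold pvHasPartner
  by_cases h : s = v
  · simp [h, PySem.Dict.getD_counter]
  · simp [h, PySem.Dict.contains_counter]

lemma hasPartner_iff_partner (l : List Int) (v s : Int) (hv : v ∈ l) :
    pvHasPartner (PySem.Dict.counter l) v s = true ↔ PartnerIdx l v s := by
  rw [hasPartner_iff, partner_iff]
  constructor
  · rintro (⟨rfl, h⟩ | ⟨hsv, hs⟩)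
    · exact Or.inl ⟨rfl, h⟩
    · exact Or.inr ⟨fun h => hsv h.symm, hv, hs⟩
  · rintro (⟨rfl, h⟩ | ⟨hsv, _, hs⟩)
    · exact Or.inl ⟨rfl, h⟩
    · exact Or.inr ⟨fun h => hsv h.symm, hs⟩

lemma inWin_iff (t c : Int) : pvInWin t c = true ↔ c - t ∈ ([-3, -2, -1, 1, 2, 3] : List Int) := by
  simp [pvInWin, List.mem_cons]
  omega

lemma near_iff (t a b : Int) :
    pvNear t a b = true ↔ (pvInWin t (a+b) = true ∨ pvInWin t |a-b| = true ∨ pvInWin t (a*b) = true) := by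
  simp [pvNear]

lemma floordiv_mul_dvd {v c : Int} (hv : v ≠ 0) (h : v ∣ c) : v * PySem.Int.floordiv c v = c := by
  obtain ⟨k, rfl⟩ := h
  show v * Int.fdiv (v*k) v = v*k
  rw [Int.mul_fdiv_cancel_left _ hv]

lemma A_iff (l : List Int) (t : Int) : has_near_miss_py l t = true ↔ PairSpec l t := by
  unfold has_near_miss_py PairSpec
  simp only [List.any_eq_true, PySem.List.mem_enumerate_iff]
  constructor
  · rintro ⟨p, ⟨i, hi, rfl⟩, q, ⟨j, hj, rfl⟩, h⟩
    by_cases hij : i = j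
    · subst hij; simp at h
    · refine ⟨i, j, hi, hj, hij, ?_⟩
      simpa [hij] using h
  · rintro ⟨i, j, hi, hj, hij, h⟩
    exact ⟨(0+(i:Int), l[i]), ⟨i, hi, rfl⟩, (0+(j:Int), l[j]), ⟨j, hj, rfl⟩, by simpa [hij] using h⟩

-- Source B's per-(v,d) check, as a Prop
lemma B_check_iff (l : List Int) (t v d : Int) (hv : v ∈ l) :
    (pvHasPartner (PySem.Dict.counter l) v ((t+d) - v) ||
      (decide (0 ≤ t+d) && (pvHasPartner (PySem.Dict.counter l) v (v - (t+d)) ||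
        pvHasPartner (PySem.Dict.counter l) v (v + (t+d)))) ||
      (if v == 0 then decide (t+d = 0 ∧ 2 ≤ l.length)
       else decide (PySem.Int.mod (t+d) v = 0) &&
         pvHasPartner (PySem.Dict.counter l) v (PySem.Int.floordiv (t+d) v))) = true ↔
    (PartnerIdx l v ((t+d) - v) ∨
     (0 ≤ t+d ∧ (PartnerIdx l v (v - (t+d)) ∨ PartnerIdx l v (v + (t+d)))) ∨
     (v = 0 ∧ t+d = 0 ∧ 2 ≤ l.length) ∨
     (v ≠ 0 ∧ PySem.Int.mod (t+d) v = 0 ∧ PartnerIdx l v (PySem.Int.floordiv (t+d) v))) := by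
  have hp : ∀ s, pvHasPartner (PySem.Dict.counter l) v s = true ↔ PartnerIdx l v s :=
    fun s => hasPartner_iff_partner l v s hv
  by_cases h0 : v = 0
  · subst h0
    simp [Bool.or_eq_true, Bool.and_eq_true, hp, or_assoc]
  · simp [h0, Bool.or_eq_true, Bool.and_eq_true, hp, or_assoc]

lemma B_iff (l : List Int) (t : Int) : has_near_miss_py_alt l t = true ↔ PairSpec l t := by
  unfold has_near_miss_py_alt
  rw [show l.foldl (fun d x => d.insert x (d.getD x 0 + 1)) PySem.Dict.empty
        = PySem.Dict.counter l from PySem.Dict.foldl_insert_getD_add_one_eq_counter l]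
  simp only [List.any_eq_true, PySem.Dict.keys_counter, PySem.Set.mem_ofList]
  constructor
  · rintro ⟨v, hv, d, hd, hchk⟩
    rw [B_check_iff l t v d hv] at hchk
    rcases hchk with hp | ⟨hc, hp | hp⟩ | ⟨h0, hc, hlen⟩ | ⟨h0, hmod, hp⟩
    · obtain ⟨i, j, hi, hj, hij, ha, hb⟩ := hp
      refine ⟨i, j, hi, hj, hij, (near_iff ..).mpr (Or.inl ?_)⟩
      rw [ha, hb, inWin_iff]
      have : v + (t + d - v) - t = d := by ring
      rwa [this]
    · obtain ⟨i, j, hi, hj, hij, ha, hb⟩ := hp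
      refine ⟨i, j, hi, hj, hij, (near_iff ..).mpr (Or.inr (Or.inl ?_))⟩
      rw [ha, hb, inWin_iff]
      have : |v - (v - (t+d))| = t + d := by rw [abs_of_nonneg]; ring_nf; omega
      rw [this]; simpa using hd
    · obtain ⟨i, j, hi, hj, hij, ha, hb⟩ := hp
      refine ⟨i, j, hi, hj, hij, (near_iff ..).mpr (Or.inr (Or.inl ?_))⟩
      rw [ha, hb, inWin_iff]
      have : |v - (v + (t+d))| = t + d := by rw [abs_sub_comm, abs_of_nonneg]; ring_nf; omega
      rw [this]; simpa using hd
    · -- v = 0, product 0 lands in the window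
      subst h0
      obtain ⟨i, hi, hia⟩ := List.mem_iff_getElem.mp hv
      refine ⟨i, if i = 0 then 1 else 0, hi, by split <;> omega, by split <;> omega,
        (near_iff ..).mpr (Or.inr (Or.inr ?_))⟩
      rw [hia, inWin_iff]
      have : (0 : Int) * l[if i = 0 then 1 else 0]'(by split <;> omega) - t = d := by
        rw [zero_mul]; omega
      rw [this]; exact hd
    · obtain ⟨i, j, hi, hj, hij, ha, hb⟩ := hp
      refine ⟨i, j, hi, hj, hij, (near_iff ..).mpr (Or.inr (Or.inr ?_))⟩
      rw [ha, hb, inWin_iff]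
      have hdvd : v ∣ (t+d) := (PySem.Int.mod_eq_zero_iff_dvd _ _).mp hmod
      rw [floordiv_mul_dvd h0 hdvd]
      have : t + d - t = d := by ring
      rwa [this]
  · rintro ⟨i, j, hi, hj, hij, hnear⟩
    set a := l[i] with ha
    set b := l[j] with hb
    have hav : a ∈ l := List.getElem_mem _
    have hpart : PartnerIdx l a b := ⟨i, j, hi, hj, hij, rfl, rfl⟩
    rcases (near_iff ..).mp hnear with hw | hw | hw
    · refine ⟨a, hav, a + b - t, (inWin_iff ..).mp hw, ?_⟩
      rw [B_check_iff l t a _ hav]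
      have : t + (a + b - t) - a = b := by ring
      rw [this]
      exact Or.inl hpart
    · refine ⟨a, hav, |a - b| - t, (inWin_iff ..).mp hw, ?_⟩
      rw [B_check_iff l t a _ hav]
      refine Or.inr (Or.inl ⟨by have := abs_nonneg (a - b); omega, ?_⟩)
      by_cases hba : b ≤ a
      · refine Or.inl ?_
        have : a - (t + (|a - b| - t)) = b := by rw [abs_of_nonneg (by omega)]; ring
        rwa [this]
      · refine Or.inr ?_
        have : a + (t + (|a - b| - t)) = b := by rw [abs_of_nonpos (by omega)]; ring
        rwa [this]
    · refine ⟨a, hav, a * b - t, (inWin_iff ..).mp hw, ?_⟩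
      rw [B_check_iff l t a _ hav]
      by_cases h0 : a = 0
      · refine Or.inr (Or.inr (Or.inl ⟨h0, by simp [h0], by omega⟩))
      · refine Or.inr (Or.inr (Or.inr ⟨h0, ?_, ?_⟩))
        · rw [PySem.Int.mod_eq_zero_iff_dvd]
          exact ⟨b, by ring⟩
        · have : t + (a * b - t) = a * b := by ring
          rw [this, show PySem.Int.floordiv (a*b) a = Int.fdiv (a*b) a from rfl,
            Int.mul_fdiv_cancel_left _ h0]
          exact hpart

-- ===== VERDICT (by name: the statement is the Claim_ definition above) =====
theorem has_near_miss_py_spec : Claim_equal_has_near_miss_py := by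
  intro numbers target _
  unfold Spec_has_near_miss_py
  rcases h : has_near_miss_py_alt numbers target with _ | _
  · rcases h2 : has_near_miss_py numbers target with _ | _
    · rfl
    · exact absurd ((B_iff numbers target).mpr ((A_iff numbers target).mp h2)) (by simp [h])
  · exact (A_iff numbers target).mpr ((B_iff numbers target).mp h)
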